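-- pv_equiv track=rewrite | github.com/arjunrajlaboratory/ProbeDesign | src/probedesign/masking.py | remove_short_runs
-- ===== SOURCE A (Python) =====
-- from typing import List, Optional, Tuple
--
-- def remove_short_runs(
--     mask: List[int],
--     min_length: int = 20,
--     tolerance: int = 2,
-- ) -> List[int]:
--     """Remove short masked runs from a mask.
--
--     Keeps only runs of masked positions that are at least (min_length - tolerance)
--     long. This helps avoid masking very short regions that are likely spurious.
--
--     Args:
--         mask: Binary mask
--         min_length: Minimum run length to keep (default 20)
--         tolerance: Allow this many gaps in the run (default 2)
--
--     Returns:
--         Filtered mask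
--     """
--     out = [0] * len(mask)
--
--     for i in range(len(mask)):
--         if mask[i] == 1:
--             # Check if this starts a sufficiently long run
--             end = min(i + min_length, len(mask))
--             window = mask[i:end]
--             if sum(window) >= min_length - tolerance:
--                 # Keep this run
--                 for j in range(i, end):
--                     if j < len(mask):
--                         out[j] = mask[j]
--
--     return out
-- ===== SOURCE B (Python) =====
-- def remove_short_runs(mask, min_length=20, tolerance=2):
--     """Single left-to-right pass: prefix sums give each window's sum, and a
--     running 'cover' pointer (furthest end of any qualifying run seen so far)
--     decides whether the current position is kept."""
--     n = len(mask)
--     total = 0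
--     prefix = [0]
--     for v in mask:
--         total += v
--         prefix.append(total)
--     thr = min_length - tolerance
--     out = []
--     cover = 0
--     for i in range(n):
--         if mask[i] == 1:
--             end = min(i + min_length, n)
--             if end > i and prefix[end] - prefix[i] >= thr:
--                 cover = max(cover, end)
--         out.append(mask[i] if i < cover else 0)
--     return out
-- ===== Notes on version B (the rewrite author's own statement) =====
-- stated objective: alternative
-- what changed: Replaces the per-position window re-summation and overlapping recopy loops by a single pass over precomputed prefix sums with a running covered-up-to pointer.
import Mathlib
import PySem

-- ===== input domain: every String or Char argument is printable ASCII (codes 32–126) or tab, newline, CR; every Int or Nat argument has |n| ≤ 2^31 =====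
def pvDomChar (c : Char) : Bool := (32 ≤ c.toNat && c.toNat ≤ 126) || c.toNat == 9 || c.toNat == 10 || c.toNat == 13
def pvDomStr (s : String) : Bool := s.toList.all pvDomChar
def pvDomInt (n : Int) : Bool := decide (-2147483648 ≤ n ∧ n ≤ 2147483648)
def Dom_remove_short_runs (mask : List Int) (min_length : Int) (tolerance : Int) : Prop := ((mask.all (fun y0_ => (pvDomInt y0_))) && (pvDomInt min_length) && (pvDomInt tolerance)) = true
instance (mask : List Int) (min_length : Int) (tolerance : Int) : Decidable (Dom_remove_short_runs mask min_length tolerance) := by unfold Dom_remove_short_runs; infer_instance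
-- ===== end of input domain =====

-- B replaces A's per-position window re-summation and overlapping recopy loops
-- by one pass over precomputed prefix sums with a running covered-up-to pointer (objective: alternative).

-- ===== PORT A =====
def remove_short_runs (mask : List Int) (min_length : Int) (tolerance : Int) : List Int :=
  let n : Int := (mask.length : Int)
  (PySem.List.pyRange 0 n 1).foldl (fun out i =>
    if PySem.List.pyGetD mask i 0 = 1 then
      -- end = min(i + min_length, len(mask)); window = mask[i:end]
      let e := min (i + min_length) n
      let window := PySem.List.slice mask (some i) (some e)
      if window.sum ≥ min_length - tolerance then
        (PySem.List.pyRange i e 1).foldl (fun out j =>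
          if j < n then PySem.List.pySetD out j (PySem.List.pyGetD mask j 0) else out) out
      else out
    else out) (List.replicate mask.length 0)

-- ===== PORT B =====
def remove_short_runs_alt (mask : List Int) (min_length : Int) (tolerance : Int) : List Int :=
  let n : Int := (mask.length : Int)
  -- prefix-sum pass: total = 0; prefix = [0]; for v in mask: total += v; prefix.append(total)
  let pfx := (mask.foldl (fun (s : Int × List Int) v => (s.1 + v, s.2 ++ [s.1 + v])) (0, [0])).2
  let thr := min_length - tolerance
  -- main pass with running cover pointer
  ((PySem.List.pyRange 0 n 1).foldl (fun (s : Int × List Int) i =>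
      let cover :=
        if PySem.List.pyGetD mask i 0 = 1 then
          let e := min (i + min_length) n
          if e > i ∧ PySem.List.pyGetD pfx e 0 - PySem.List.pyGetD pfx i 0 ≥ thr then
            max s.1 e
          else s.1
        else s.1
      (cover, s.2 ++ [if i < cover then PySem.List.pyGetD mask i 0 else 0])) ((0 : Int), ([] : List Int))).2

-- ===== PRECONDITION & SPEC =====
def Spec_remove_short_runs (mask : List Int) (min_length : Int) (tolerance : Int) (out : List Int) : Prop := out = remove_short_runs_alt mask min_length tolerance
instance (mask : List Int) (min_length : Int) (tolerance : Int) (out : List Int) : Decidable (Spec_remove_short_runs mask min_length tolerance out) := by unfold Spec_remove_short_runs; infer_instance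

-- ===== CLAIM (what is proved, stated in full; the proofs are below) =====
def Claim_equal_remove_short_runs : Prop := ∀ (mask : List Int) (min_length : Int) (tolerance : Int), Dom_remove_short_runs mask min_length tolerance → Spec_remove_short_runs mask min_length tolerance (remove_short_runs mask min_length tolerance)

-- ===== LEMMAS AND PROOFS =====

lemma pv_set_map_range {n : Nat} (g : Nat → Int) (k : Nat) (v : Int) :
    ((List.range n).map g).set k v = (List.range n).map (fun j => if j = k then v else g j) := by
  apply List.ext_getElem
  · simp
  · intro idx h1 h2
    simp only [List.getElem_set, List.getElem_map, List.getElem_range]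
    split_ifs with h h' h' <;> first | rfl | omega

lemma pv_inner (mask : List Int) (g : Nat → Int) (i e : Int) (hi : 0 ≤ i) :
    (PySem.List.pyRange i e 1).foldl (fun out j =>
        if j < (mask.length : Int) then PySem.List.pySetD out j (PySem.List.pyGetD mask j 0) else out)
      ((List.range mask.length).map g)
    = (List.range mask.length).map (fun (j : Nat) =>
        if i ≤ (j : Int) ∧ (j : Int) < e then PySem.List.pyGetD mask (j : Int) 0 else g j) := by
  induction hn : (e - i).toNat generalizing i g with
  | zero =>
    have hie : e ≤ i := by omega
    rw [PySem.List.pyRange_one_eq_nil hie]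
    simp only [List.foldl_nil]
    apply List.map_congr_left
    intro j hj
    rw [if_neg]; omega
  | succ n ih =>
    have hie : i < e := by omega
    rw [PySem.List.pyRange_one_cons hie]
    simp only [List.foldl_cons]
    have hstep : (if i < (mask.length : Int) then PySem.List.pySetD ((List.range mask.length).map g) i (PySem.List.pyGetD mask i 0) else (List.range mask.length).map g)
        = (List.range mask.length).map (fun (j : Nat) => if (j : Int) = i then PySem.List.pyGetD mask i 0 else g j) := by
      split_ifs with h
      · rw [PySem.List.pySetD_of_nonneg _ _ hi, pv_set_map_range]
        apply List.map_congr_left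
        intro j hj
        simp only [List.mem_range] at hj
        by_cases hji : (j : Int) = i
        · rw [if_pos hji, if_pos (by omega)]
        · rw [if_neg (by omega), if_neg hji]
      · apply List.map_congr_left
        intro j hj
        simp only [List.mem_range] at hj
        rw [if_neg (by omega)]
    rw [hstep, ih _ _ (by omega) (by omega)]
    apply List.map_congr_left
    intro j hj
    simp only [List.mem_range] at hj
    by_cases hji : (j : Int) = i
    · rw [if_neg (by omega), if_pos hji, if_pos (by omega), hji]
    · by_cases hc : i + 1 ≤ (j : Int) ∧ (j : Int) < e
      · rw [if_pos hc, if_pos (by omega)]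
      · rw [if_neg hc, if_neg hji, if_neg (by omega)]

def pvCond (mask : List Int) (m t i : Int) : Bool :=
  (PySem.List.pyGetD mask i 0 == 1) &&
  decide ((PySem.List.slice mask (some i) (some (min (i + m) (mask.length : Int)))).sum ≥ m - t)

def pvCov (mask : List Int) (m t b j : Int) : Bool :=
  (PySem.List.pyRange 0 b 1).any (fun i =>
    pvCond mask m t i && decide (i ≤ j) && decide (j < min (i + m) (mask.length : Int)))

lemma pv_covA_succ (mask : List Int) (m t b : Int) (hb : 0 ≤ b) (j : Int) :
    pvCov mask m t (b + 1) j
    = (pvCov mask m t b j ||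
       (pvCond mask m t b && decide (b ≤ j) && decide (j < min (b + m) (mask.length : Int)))) := by
  unfold pvCov
  rw [PySem.List.pyRange_one_succ_right hb]
  simp [List.any_append]

lemma pv_covA_zero (mask : List Int) (m t j : Int) : pvCov mask m t 0 j = false := by
  unfold pvCov
  rw [PySem.List.pyRange_one_eq_nil (le_refl (0:Int))]
  rfl

lemma pv_outerA (mask : List Int) (m t : Int) (b : Int) (hb : 0 ≤ b) :
    (PySem.List.pyRange 0 b 1).foldl (fun out i =>
      if PySem.List.pyGetD mask i 0 = 1 then
        let e := min (i + m) (mask.length : Int)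
        let window := PySem.List.slice mask (some i) (some e)
        if window.sum ≥ m - t then
          (PySem.List.pyRange i e 1).foldl (fun out j =>
            if j < (mask.length : Int) then PySem.List.pySetD out j (PySem.List.pyGetD mask j 0) else out) out
        else out
      else out) (List.replicate mask.length 0)
    = (List.range mask.length).map (fun (j : Nat) =>
        if pvCov mask m t b (j : Int) then PySem.List.pyGetD mask (j : Int) 0 else 0) := by
  induction hn : b.toNat generalizing b with
  | zero =>
    have hb0 : b = 0 := by omega
    subst hb0
    rw [PySem.List.pyRange_one_eq_nil (le_refl (0:Int))]
    simp only [List.foldl_nil]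
    apply List.ext_getElem
    · simp
    · intro k h1 h2
      simp [pv_covA_zero]
  | succ n ih =>
    obtain ⟨c, rfl⟩ : ∃ c, b = c + 1 := ⟨b - 1, by omega⟩
    have hc0 : 0 ≤ c := by omega
    rw [PySem.List.pyRange_one_succ_right hc0, List.foldl_append,
        ih c hc0 (by omega), List.foldl_cons, List.foldl_nil]
    simp only
    split_ifs with h1 h2
    · -- mask[c] == 1 and window sum large enough: inner loop runs
      rw [pv_inner mask _ c (min (c + m) (mask.length : Int)) hc0]
      apply List.map_congr_left
      intro j hj
      simp only [List.mem_range] at hj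
      rw [pv_covA_succ mask m t c hc0]
      have hcond : pvCond mask m t c = true := by
        unfold pvCond
        simp [h1, h2]
      by_cases hcase : c ≤ (j : Int) ∧ (j : Int) < min (c + m) (mask.length : Int)
      · rw [if_pos hcase, if_pos (by simp [hcond, hcase.1, hcase.2])]
      · rw [if_neg hcase]
        have hconj : (pvCond mask m t c && decide (c ≤ (j:Int)) && decide ((j:Int) < min (c+m) (mask.length:Int))) = false := by
          rcases not_and_or.mp hcase with h | h <;> simp [h]
        rw [hconj, Bool.or_false]
    · -- window sum too small
      apply List.map_congr_left
      intro j hj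
      rw [pv_covA_succ mask m t c hc0]
      have : pvCond mask m t c = false := by
        unfold pvCond
        simp only [Bool.and_eq_false_iff]
        right
        simpa using h2
      have hconj : (pvCond mask m t c && decide (c ≤ (j:Int)) && decide ((j:Int) < min (c+m) (mask.length:Int))) = false := by
        simp [this]
      rw [hconj, Bool.or_false]
    · -- mask[c] ≠ 1
      apply List.map_congr_left
      intro j hj
      rw [pv_covA_succ mask m t c hc0]
      have : pvCond mask m t c = false := by
        unfold pvCond
        simp only [Bool.and_eq_false_iff]
        left
        simpa using h1
      have hconj : (pvCond mask m t c && decide (c ≤ (j:Int)) && decide ((j:Int) < min (c+m) (mask.length:Int))) = false := by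
        simp [this]
      rw [hconj, Bool.or_false]

lemma pv_pfx_aux (xs : List Int) : ∀ (a : Int) (p : List Int),
    xs.foldl (fun (s : Int × List Int) v => (s.1 + v, s.2 ++ [s.1 + v])) (a, p)
    = (a + xs.sum, p ++ (List.range xs.length).map (fun k => a + (xs.take (k + 1)).sum)) := by
  induction xs with
  | nil => intro a p; simp
  | cons x xs ih =>
    intro a p
    simp only [List.foldl_cons, ih (a + x) (p ++ [a + x])]
    refine Prod.ext ?_ ?_
    · simp [add_assoc]
    · rw [List.length_cons, List.range_succ_eq_map]
      simp only [List.map_cons, List.map_map, List.append_assoc]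
      congr 1
      simp only [List.take_succ_cons, List.sum_cons, List.singleton_append]
      congr 1
      · simp
      · apply List.map_congr_left
        intro k hk
        simp only [Function.comp]
        ring

lemma pv_pfx (mask : List Int) :
    (mask.foldl (fun (s : Int × List Int) v => (s.1 + v, s.2 ++ [s.1 + v])) (0, [0])).2
    = (List.range (mask.length + 1)).map (fun k => (mask.take k).sum) := by
  rw [pv_pfx_aux mask 0 [0], List.range_succ_eq_map]
  simp only [List.map_cons, List.take_zero, List.sum_nil, List.map_map]
  rw [List.singleton_append]
  congr 1
  apply List.map_congr_left
  intro k hk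
  simp [Function.comp]

lemma pv_pfx_get (mask : List Int) (k : Int) (h0 : 0 ≤ k) (h1 : k ≤ (mask.length : Int)) :
    PySem.List.pyGetD ((List.range (mask.length + 1)).map (fun k => (mask.take k).sum)) k 0
    = (mask.take k.toNat).sum := by
  have hk : k = ((k.toNat : Nat) : Int) := by omega
  rw [hk, PySem.List.pyGetD_natCast]
  have : k.toNat < mask.length + 1 := by omega
  have h2 : (max k 0).toNat = k.toNat := by omega
  simp [this, h2]

lemma pv_slice_sum (mask : List Int) (i e : Int) (h0 : 0 ≤ i) (hie : i ≤ e) :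
    (PySem.List.slice mask (some i) (some e)).sum
    = (mask.take e.toNat).sum - (mask.take i.toNat).sum := by
  rw [PySem.List.slice_toNat (ha := h0) (hb := le_trans h0 hie)]
  have he : e.toNat = i.toNat + (e.toNat - i.toNat) := by omega
  conv_rhs => rw [he]
  rw [List.take_add, List.sum_append]
  ring

def pvCover (mask : List Int) (m t b : Int) : Int :=
  (PySem.List.pyRange 0 b 1).foldl (fun c i =>
    if (PySem.List.pyGetD mask i 0 = 1 ∧ i < min (i + m) (mask.length : Int) ∧
        (mask.take (min (i + m) (mask.length : Int)).toNat).sum - (mask.take i.toNat).sum ≥ m - t)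
    then max c (min (i + m) (mask.length : Int)) else c) 0

lemma pv_cover_succ (mask : List Int) (m t b : Int) (hb : 0 ≤ b) :
    pvCover mask m t (b + 1)
    = (if (PySem.List.pyGetD mask b 0 = 1 ∧ b < min (b + m) (mask.length : Int) ∧
           (mask.take (min (b + m) (mask.length : Int)).toNat).sum - (mask.take b.toNat).sum ≥ m - t)
       then max (pvCover mask m t b) (min (b + m) (mask.length : Int)) else pvCover mask m t b) := by
  unfold pvCover
  rw [PySem.List.pyRange_one_succ_right hb, List.foldl_append, List.foldl_cons, List.foldl_nil]

lemma pv_foldmax_gt (P : Int → Prop) [DecidablePred P] (f : Int → Int) :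
    ∀ (l : List Int) (c0 x : Int),
      (x < l.foldl (fun c i => if P i then max c (f i) else c) c0
       ↔ x < c0 ∨ ∃ i ∈ l, P i ∧ x < f i) := by
  intro l
  induction l with
  | nil => intro c0 x; simp
  | cons a l ih =>
    intro c0 x
    rw [List.foldl_cons, ih]
    by_cases hPa : P a
    · rw [if_pos hPa]
      constructor
      · rintro (h | h)
        · rcases lt_max_iff.mp h with h' | h'
          · exact Or.inl h'
          · exact Or.inr ⟨a, List.mem_cons_self, hPa, h'⟩
        · obtain ⟨i, hi, h1, h2⟩ := h
          exact Or.inr ⟨i, List.mem_cons_of_mem _ hi, h1, h2⟩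
      · rintro (h | ⟨i, hi, h1, h2⟩)
        · exact Or.inl (lt_max_iff.mpr (Or.inl h))
        · rcases List.mem_cons.mp hi with rfl | hi'
          · exact Or.inl (lt_max_iff.mpr (Or.inr h2))
          · exact Or.inr ⟨i, hi', h1, h2⟩
    · rw [if_neg hPa]
      constructor
      · rintro (h | ⟨i, hi, h1, h2⟩)
        · exact Or.inl h
        · exact Or.inr ⟨i, List.mem_cons_of_mem _ hi, h1, h2⟩
      · rintro (h | ⟨i, hi, h1, h2⟩)
        · exact Or.inl h
        · rcases List.mem_cons.mp hi with rfl | hi'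
          · exact absurd h1 hPa
          · exact Or.inr ⟨i, hi', h1, h2⟩

lemma pv_cover_gt (mask : List Int) (m t : Int) (b x : Int) (hx : 0 ≤ x) :
    x < pvCover mask m t b ↔
      ∃ i ∈ PySem.List.pyRange 0 b 1,
        (PySem.List.pyGetD mask i 0 = 1 ∧ i < min (i + m) (mask.length : Int) ∧
         (mask.take (min (i + m) (mask.length : Int)).toNat).sum - (mask.take i.toNat).sum ≥ m - t) ∧
        x < min (i + m) (mask.length : Int) := by
  unfold pvCover
  rw [pv_foldmax_gt (fun i => (PySem.List.pyGetD mask i 0 = 1 ∧ i < min (i + m) (mask.length : Int) ∧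
         (mask.take (min (i + m) (mask.length : Int)).toNat).sum - (mask.take i.toNat).sum ≥ m - t))
      (fun i => min (i + m) (mask.length : Int))]
  constructor
  · rintro (h | h)
    · omega
    · exact h
  · exact Or.inr

lemma pv_outerB (mask : List Int) (m t : Int) (b : Int) (hb : 0 ≤ b) :
    (PySem.List.pyRange 0 b 1).foldl (fun (s : Int × List Int) i =>
      let cover :=
        if PySem.List.pyGetD mask i 0 = 1 then
          let e := min (i + m) (mask.length : Int)
          if e > i ∧ (mask.take e.toNat).sum - (mask.take i.toNat).sum ≥ m - t then max s.1 e else s.1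
        else s.1
      (cover, s.2 ++ [if i < cover then PySem.List.pyGetD mask i 0 else 0])) ((0 : Int), ([] : List Int))
    = (pvCover mask m t b,
       (List.range b.toNat).map (fun (j : Nat) =>
          if (j : Int) < pvCover mask m t ((j : Int) + 1) then PySem.List.pyGetD mask (j : Int) 0 else 0)) := by
  induction hn : b.toNat generalizing b with
  | zero =>
    have hb0 : b = 0 := by omega
    subst hb0
    rw [PySem.List.pyRange_one_eq_nil (le_refl (0:Int))]
    simp only [List.foldl_nil, List.range_zero, List.map_nil]
    unfold pvCover
    rw [PySem.List.pyRange_one_eq_nil (le_refl (0:Int))]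
    rfl
  | succ n ih =>
    obtain ⟨c, rfl⟩ : ∃ c, b = c + 1 := ⟨b - 1, by omega⟩
    have hc0 : 0 ≤ c := by omega
    rw [PySem.List.pyRange_one_succ_right hc0, List.foldl_append,
        ih c hc0 (by omega), List.foldl_cons, List.foldl_nil]
    simp only
    have hcov : (if PySem.List.pyGetD mask c 0 = 1 then
          let e := min (c + m) (mask.length : Int)
          if e > c ∧ (mask.take e.toNat).sum - (mask.take c.toNat).sum ≥ m - t then
            max (pvCover mask m t c) e
          else pvCover mask m t c
        else pvCover mask m t c) = pvCover mask m t (c + 1) := by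
      rw [pv_cover_succ mask m t c hc0]
      by_cases h1 : PySem.List.pyGetD mask c 0 = 1
      · simp only [if_pos h1]
        by_cases h2 : min (c + m) (mask.length : Int) > c ∧
            (mask.take (min (c + m) (mask.length : Int)).toNat).sum - (mask.take c.toNat).sum ≥ m - t
        · rw [if_pos h2, if_pos ⟨h1, h2.1, h2.2⟩]
        · rw [if_neg h2, if_neg (by tauto)]
      · rw [if_neg h1, if_neg (by tauto)]
    rw [hcov]
    refine Prod.ext rfl ?_
    simp only
    rw [List.range_succ, List.map_append, List.map_cons, List.map_nil]
    congr 2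
    have hcast : ((n : Nat) : Int) = c := by omega
    rw [hcast]

lemma pv_cov_iff (mask : List Int) (m t : Int) (j : Nat) (hj : j < mask.length) :
    pvCov mask m t (mask.length : Int) (j : Int) = true ↔
    (j : Int) < pvCover mask m t ((j : Int) + 1) := by
  rw [pv_cover_gt mask m t ((j : Int) + 1) (j : Int) (by omega)]
  unfold pvCov
  rw [List.any_eq_true]
  constructor
  · rintro ⟨i, hi, hcond⟩
    simp only [Bool.and_eq_true, decide_eq_true_eq] at hcond
    obtain ⟨⟨hc, hij⟩, hje⟩ := hcond
    unfold pvCond at hc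
    simp only [Bool.and_eq_true, beq_iff_eq, decide_eq_true_eq] at hc
    rw [PySem.List.mem_pyRange_one] at hi
    have hie : i < min (i + m) (mask.length : Int) := by omega
    have hsum : (mask.take (min (i + m) (mask.length : Int)).toNat).sum - (mask.take i.toNat).sum ≥ m - t := by
      rw [← pv_slice_sum mask i _ (by omega) (by omega)]
      exact hc.2
    exact ⟨i, PySem.List.mem_pyRange_one.mpr (by omega), ⟨hc.1, hie, hsum⟩, by omega⟩
  · rintro ⟨i, hi, ⟨h1, h2, h3⟩, h4⟩
    rw [PySem.List.mem_pyRange_one] at hi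
    refine ⟨i, PySem.List.mem_pyRange_one.mpr (by omega), ?_⟩
    simp only [Bool.and_eq_true, decide_eq_true_eq]
    refine ⟨⟨?_, by omega⟩, by omega⟩
    unfold pvCond
    simp only [Bool.and_eq_true, beq_iff_eq, decide_eq_true_eq]
    refine ⟨h1, ?_⟩
    rw [pv_slice_sum mask i _ (by omega) (by omega)]
    exact h3

theorem pv_main (mask : List Int) (m t : Int) :
    remove_short_runs mask m t = remove_short_runs_alt mask m t := by
  have hA := pv_outerA mask m t (mask.length : Int) (by omega)
  have hB : remove_short_runs_alt mask m t
      = (List.range mask.length).map (fun (j : Nat) =>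
          if (j : Int) < pvCover mask m t ((j : Int) + 1) then PySem.List.pyGetD mask (j : Int) 0 else 0) := by
    have hdef : remove_short_runs_alt mask m t
        = ((PySem.List.pyRange 0 (mask.length : Int) 1).foldl (fun (s : Int × List Int) i =>
            let cover :=
              if PySem.List.pyGetD mask i 0 = 1 then
                let e := min (i + m) (mask.length : Int)
                if e > i ∧ PySem.List.pyGetD ((mask.foldl (fun (s : Int × List Int) v => (s.1 + v, s.2 ++ [s.1 + v])) (0, [0])).2) e 0
                    - PySem.List.pyGetD ((mask.foldl (fun (s : Int × List Int) v => (s.1 + v, s.2 ++ [s.1 + v])) (0, [0])).2) i 0 ≥ m - t then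
                  max s.1 e
                else s.1
              else s.1
            (cover, s.2 ++ [if i < cover then PySem.List.pyGetD mask i 0 else 0])) ((0 : Int), ([] : List Int))).2 := rfl
    rw [hdef, pv_pfx]
    have hbody : ∀ (s : Int × List Int) (i : Int), i ∈ PySem.List.pyRange 0 (mask.length : Int) 1 →
        (let cover :=
          if PySem.List.pyGetD mask i 0 = 1 then
            let e := min (i + m) (mask.length : Int)
            if e > i ∧ PySem.List.pyGetD ((List.range (mask.length + 1)).map (fun k => (mask.take k).sum)) e 0
                - PySem.List.pyGetD ((List.range (mask.length + 1)).map (fun k => (mask.take k).sum)) i 0 ≥ m - t then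
              max s.1 e
            else s.1
          else s.1
         (cover, s.2 ++ [if i < cover then PySem.List.pyGetD mask i 0 else 0]))
        = (let cover :=
          if PySem.List.pyGetD mask i 0 = 1 then
            let e := min (i + m) (mask.length : Int)
            if e > i ∧ (mask.take e.toNat).sum - (mask.take i.toNat).sum ≥ m - t then max s.1 e else s.1
          else s.1
           (cover, s.2 ++ [if i < cover then PySem.List.pyGetD mask i 0 else 0])) := by
      intro s i hi
      rw [PySem.List.mem_pyRange_one] at hi
      simp only
      by_cases h1 : PySem.List.pyGetD mask i 0 = 1
      · simp only [if_pos h1]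
        by_cases hei : min (i + m) (mask.length : Int) > i
        · rw [pv_pfx_get mask (min (i + m) (mask.length : Int)) (by omega) (by omega),
              pv_pfx_get mask i (by omega) (by omega)]
        · rw [if_neg (show ¬(min (i + m) (mask.length : Int) > i ∧
                PySem.List.pyGetD ((List.range (mask.length + 1)).map (fun k => (mask.take k).sum)) (min (i + m) (mask.length : Int)) 0
                - PySem.List.pyGetD ((List.range (mask.length + 1)).map (fun k => (mask.take k).sum)) i 0 ≥ m - t)
                from fun h => hei h.1),
              if_neg (show ¬(min (i + m) (mask.length : Int) > i ∧
                (mask.take (min (i + m) (mask.length : Int)).toNat).sum - (mask.take i.toNat).sum ≥ m - t)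
                from fun h => hei h.1)]
      · simp only [if_neg h1]
    rw [PySem.List.foldl_congr_mem
        (f := fun (s : Int × List Int) i =>
          let cover :=
            if PySem.List.pyGetD mask i 0 = 1 then
              let e := min (i + m) (mask.length : Int)
              if e > i ∧ PySem.List.pyGetD ((List.range (mask.length + 1)).map (fun k => (mask.take k).sum)) e 0
                  - PySem.List.pyGetD ((List.range (mask.length + 1)).map (fun k => (mask.take k).sum)) i 0 ≥ m - t then
                max s.1 e
              else s.1
            else s.1
          (cover, s.2 ++ [if i < cover then PySem.List.pyGetD mask i 0 else 0]))
        (g := fun (s : Int × List Int) i =>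
          let cover :=
            if PySem.List.pyGetD mask i 0 = 1 then
              let e := min (i + m) (mask.length : Int)
              if e > i ∧ (mask.take e.toNat).sum - (mask.take i.toNat).sum ≥ m - t then max s.1 e else s.1
            else s.1
          (cover, s.2 ++ [if i < cover then PySem.List.pyGetD mask i 0 else 0]))
        (h := hbody),
      pv_outerB mask m t (mask.length : Int) (by omega)]
    simp
  rw [hB]
  simp only [remove_short_runs] at hA ⊢
  rw [hA]
  apply List.map_congr_left
  intro j hj
  simp only [List.mem_range] at hj
  by_cases hc : pvCov mask m t (mask.length : Int) (j : Int) = true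
  · rw [if_pos hc, if_pos ((pv_cov_iff mask m t j hj).mp hc)]
  · rw [if_neg hc, if_neg (fun h => hc ((pv_cov_iff mask m t j hj).mpr h))]

-- ===== VERDICT (by name: the statement is the Claim_ definition above) =====
theorem remove_short_runs_spec : Claim_equal_remove_short_runs := by
  intro mask min_length tolerance _
  unfold Spec_remove_short_runs
  exact pv_main mask min_length tolerance
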